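-- pv_equiv track=rewrite | github.com/alexandraback/datacollection | solutions_5636311922769920_0/Python/Bayesian/D.py | solve
-- ===== SOURCE A (Python) =====
-- import math
--
-- def solve(K, C, S):
--     N = math.ceil(K/C)
--     if N > S:
--         return "IMPOSSIBLE"
--
--     resposta = ""
--     for i in range(N):
--         s = 0
--         k = 1
--         for q in range(C):
--             d = C*i + q
--             if d >= K:
--                 break
--
--             s += d*k
--             k *= K
--         resposta += str(s+1) + " "
--     return resposta
-- ===== SOURCE B (Python) =====
-- def solve(K, C, S):
--     N = -(-K // C)  # exact integer ceil(K / C)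
--     if N > S:
--         return "IMPOSSIBLE"
--     # A token's digits are the consecutive positions C*i, C*i+1, ..., so its value is
--     # a*P_m + T_m where a = C*i, m is the chunk length, P_m = sum(K**q for q in range(m)),
--     # T_m = sum(q * K**q for q in range(m)).  All tokens but the last have m = C, so the
--     # token values form an arithmetic progression with common difference C*P_C: compute
--     # (P, T) once, emit the first N-1 tokens in O(1) each, and handle the short last chunk
--     # with one more constants computation.
--     def consts(m):
--         P = T = 0
--         pw = 1
--         for q in range(m):
--             P += pw
--             T += q * pw
--             pw *= K
--         return P, T
--     parts = []
--     if N > 1: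
--         P, T = consts(C)
--         parts = [str(C * i * P + T + 1) + " " for i in range(N - 1)]
--     if N > 0:
--         lP, lT = consts(K - C * (N - 1))
--         parts.append(str(C * (N - 1) * lP + lT + 1) + " ")
--     return "".join(parts)
-- ===== Notes on version B (the rewrite author's own statement) =====
-- stated objective: alternative
-- what changed: Instead of re-running the digit/power loop for every token, B uses the fact that the token values form an arithmetic progression: it computes the chunk constants P=sum(K^q) and T=sum(q*K^q) once (only when a full chunk exists), emits each full token by the closed form C*i*P+T+1, and computes only the short last chunk's constants separately; the IMPOSSIBLE guard uses exact integer ceiling -(-K//C). Fewer arithmetic steps (O(N+C) vs O(N*C)) but runtime is dominated by big-int str() in both, so no measured speedup.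
import Mathlib
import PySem

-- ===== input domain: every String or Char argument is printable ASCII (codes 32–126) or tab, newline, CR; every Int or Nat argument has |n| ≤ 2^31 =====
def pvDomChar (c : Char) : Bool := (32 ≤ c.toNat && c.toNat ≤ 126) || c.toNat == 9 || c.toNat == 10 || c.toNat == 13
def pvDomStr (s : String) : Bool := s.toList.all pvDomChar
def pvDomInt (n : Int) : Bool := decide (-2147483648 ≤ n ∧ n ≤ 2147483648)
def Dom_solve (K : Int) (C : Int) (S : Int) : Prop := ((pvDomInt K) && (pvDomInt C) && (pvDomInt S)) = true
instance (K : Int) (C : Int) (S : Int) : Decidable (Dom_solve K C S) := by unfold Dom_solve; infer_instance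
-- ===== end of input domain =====

-- B replaces A's per-token digit/power loop by the chunk constants P = Σ K^q, T = Σ q·K^q computed
-- once: every full token is the closed form C*i*P + T + 1, only the short last chunk gets its own
-- constants; objective: alternative (fewer arithmetic steps, same measured cost).

-- ===== PORT A =====
-- math.ceil(K/C) is ported as the exact integer ceiling -((-K) // C); for |K|,|C| ≤ 2^31 the float
-- quotient rounds to a value with the same ceiling, so this is exact on Dom.  The 'break' is ported
-- as a broken-flag in the fold state (s, k, broken).
def solve (K : Int) (C : Int) (S : Int) : String :=
  let N : Int := -(PySem.Int.floordiv (-K) C)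
  if N > S then "IMPOSSIBLE"
  else
    (PySem.List.pyRange 0 N 1).foldl (fun resposta i =>
      resposta ++ (PySem.Int.toStr
        (((PySem.List.pyRange 0 C 1).foldl
          (fun (st : Int × Int × Bool) q =>
            if st.2.2 then st
            else if C * i + q ≥ K then (st.1, st.2.1, true)
            else (st.1 + (C * i + q) * st.2.1, st.2.1 * K, false))
          (0, 1, false)).1 + 1) ++ " ")) ""

-- ===== PORT B =====
-- Source B's consts(m): one pass accumulating (P, T, pw)
def consts (K : Int) (m : Int) : Int × Int :=
  let st := (PySem.List.pyRange 0 m 1).foldl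
    (fun (st : Int × Int × Int) q => (st.1 + st.2.2, st.2.1 + q * st.2.2, st.2.2 * K)) (0, 0, 1)
  (st.1, st.2.1)

def solve_alt (K : Int) (C : Int) (S : Int) : String :=
  let N : Int := -(PySem.Int.floordiv (-K) C)
  if N > S then "IMPOSSIBLE"
  else
    let parts := if N > 1 then
        let PT := consts K C
        (PySem.List.pyRange 0 (N - 1) 1).map
          (fun i => PySem.Int.toStr (C * i * PT.1 + PT.2 + 1) ++ " ")
      else []
    let parts := if N > 0 then
        let l := consts K (K - C * (N - 1))
        parts ++ [PySem.Int.toStr (C * (N - 1) * l.1 + l.2 + 1) ++ " "]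
      else parts
    PySem.Str.join "" parts

-- ===== PRECONDITION & SPEC =====
-- Pre_ excludes exactly C = 0, where Python A raises ZeroDivisionError (K/C); B raises there too.
def Pre_solve (K : Int) (C : Int) (S : Int) : Prop := C ≠ 0
instance (K : Int) (C : Int) (S : Int) : Decidable (Pre_solve K C S) := by unfold Pre_solve; infer_instance
def pvWitness_solve : Int × Int × Int := (7, 3, 5)

def Spec_solve (K : Int) (C : Int) (S : Int) (out : String) : Prop := out = solve_alt K C S
instance (K : Int) (C : Int) (S : Int) (out : String) : Decidable (Spec_solve K C S out) := by unfold Spec_solve; infer_instance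

-- ===== CLAIM (what is proved, stated in full; the proofs are below) =====
def Claim_equal_solve : Prop := ∀ (K : Int) (C : Int) (S : Int), Dom_solve K C S → Pre_solve K C S → Spec_solve K C S (solve K C S)

-- ===== LEMMAS AND PROOFS =====

-- Σ_{q<n} K^q and Σ_{q<n} q·K^q, appended-at-the-top form
def psumK (K : Int) : Nat → Int
  | 0 => 0
  | n + 1 => psumK K n + K ^ n
def tsumK (K : Int) : Nat → Int
  | 0 => 0
  | n + 1 => tsumK K n + (n : Int) * K ^ n

theorem psum_succ' (K : Int) : ∀ n : Nat, psumK K (n + 1) = 1 + K * psumK K n := by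
  intro n
  induction n with
  | zero => simp [psumK]
  | succ n ih =>
    show psumK K (n + 1) + K ^ (n + 1) = 1 + K * (psumK K n + K ^ n)
    rw [ih, pow_succ]; ring

theorem tsum_succ' (K : Int) : ∀ n : Nat, tsumK K (n + 1) = K * (psumK K n + tsumK K n) := by
  intro n
  induction n with
  | zero => simp [tsumK, psumK]
  | succ n ih =>
    show tsumK K (n + 1) + ((n + 1 : Nat) : Int) * K ^ (n + 1)
        = K * ((psumK K n + K ^ n) + (tsumK K n + (n : Int) * K ^ n))
    rw [ih, pow_succ]; push_cast; ring

-- the consts fold invariant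
theorem consts_fold (K : Int) : ∀ n : Nat,
    (PySem.List.pyRange 0 (n : Int) 1).foldl
      (fun (st : Int × Int × Int) q => (st.1 + st.2.2, st.2.1 + q * st.2.2, st.2.2 * K)) (0, 0, 1)
    = (psumK K n, tsumK K n, K ^ n) := by
  intro n
  induction n with
  | zero => simp [psumK, tsumK, PySem.List.pyRange_one_eq_nil]
  | succ n ih =>
    have hc : ((n + 1 : Nat) : Int) = (n : Int) + 1 := by push_cast; ring
    rw [hc, PySem.List.pyRange_one_succ_right (by positivity), List.foldl_append, ih]
    simp [psumK, tsumK, pow_succ, mul_comm]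

theorem consts_eq (K m : Int) : consts K m = (psumK K m.toNat, tsumK K m.toNat) := by
  unfold consts
  by_cases h : m ≤ 0
  · rw [PySem.List.pyRange_one_eq_nil h]
    have : m.toNat = 0 := by omega
    simp [this, psumK, tsumK]
  · have : m = ((m.toNat : Nat) : Int) := by omega
    rw [this, consts_fold]
    show (psumK K m.toNat, tsumK K m.toNat) = _
    simp only [Int.toNat_natCast]

-- A's inner loop value, as a structural recursion over the remaining chunk length
def F (K : Int) : Nat → Int → Int
  | 0, _ => 0
  | n + 1, a => if a ≥ K then 0 else a + K * F K n (a + 1)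

-- closed form of F: a * psumK m + tsumK m over the digits actually below K
theorem F_closed (K : Int) : ∀ (n : Nat) (a : Int),
    F K n a = a * psumK K (min n (K - a).toNat) + tsumK K (min n (K - a).toNat) := by
  intro n
  induction n with
  | zero => intro a; simp [F, psumK, tsumK]
  | succ n ih =>
    intro a
    by_cases h : a ≥ K
    · have h0 : (K - a).toNat = 0 := by omega
      simp [F, h, h0, psumK, tsumK]
    · have h1 : (K - a).toNat = (K - (a + 1)).toNat + 1 := by omega
      have h2 : min (n + 1) ((K - (a + 1)).toNat + 1) = min n (K - (a + 1)).toNat + 1 := by omega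
      simp only [F, if_neg h, ih (a + 1), h1, h2, psum_succ', tsum_succ']
      ring

-- A's inner break-fold: once broken it stays put
theorem run_broken (K a : Int) (L : List Int) (s k : Int) :
    L.foldl (fun (st : Int × Int × Bool) q =>
        if st.2.2 then st
        else if a + q ≥ K then (st.1, st.2.1, true)
        else (st.1 + (a + q) * st.2.1, st.2.1 * K, false)) (s, k, true) = (s, k, true) := by
  induction L with
  | nil => rfl
  | cons x xs ih => simpa using ih

def wsum (K a : Int) : List Int → Int
  | [] => 0
  | q :: rest => if a + q ≥ K then 0 else (a + q) + K * wsum K a rest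

theorem runA (K a : Int) (L : List Int) : ∀ (s k : Int),
    (L.foldl (fun (st : Int × Int × Bool) q =>
        if st.2.2 then st
        else if a + q ≥ K then (st.1, st.2.1, true)
        else (st.1 + (a + q) * st.2.1, st.2.1 * K, false)) (s, k, false)).1
    = s + k * wsum K a L := by
  induction L with
  | nil => intro s k; simp [wsum]
  | cons q rest ih =>
    intro s k
    by_cases h : a + q ≥ K
    · simp only [List.foldl_cons, wsum]
      rw [if_neg (by simp), if_pos h, if_pos h, run_broken]
      ring
    · simp only [List.foldl_cons, wsum]
      rw [if_neg (by simp), if_neg h, if_neg h, ih]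
      ring

theorem wsum_eq_F (K a : Int) : ∀ (n : Nat) (q : Int),
    wsum K a (PySem.List.pyRange q (q + n) 1) = F K n (a + q) := by
  intro n
  induction n with
  | zero =>
    intro q
    rw [PySem.List.pyRange_one_eq_nil (by omega)]
    simp [wsum, F]
  | succ n ih =>
    intro q
    rw [PySem.List.pyRange_one_cons (by push_cast; omega)]
    have hc : q + ((n + 1 : Nat) : Int) = (q + 1) + (n : Nat) := by push_cast; ring
    simp only [wsum, F]
    rw [show PySem.List.pyRange (q + 1) (q + ((n + 1 : Nat) : Int)) 1
          = PySem.List.pyRange (q + 1) ((q + 1) + (n : Nat)) 1 by rw [hc],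
        ih (q + 1), show a + (q + 1) = a + q + 1 by ring]

-- A's token value as F
theorem tokenA_eq_F (K C i : Int) :
    ((PySem.List.pyRange 0 C 1).foldl
        (fun (st : Int × Int × Bool) q =>
          if st.2.2 then st
          else if C * i + q ≥ K then (st.1, st.2.1, true)
          else (st.1 + (C * i + q) * st.2.1, st.2.1 * K, false)) (0, 1, false)).1
    = F K C.toNat (C * i) := by
  rw [runA]
  by_cases h : C ≤ 0
  · rw [PySem.List.pyRange_one_eq_nil h]
    have : C.toNat = 0 := by omega
    simp [this, wsum, F]
  · have hC : C = ((C.toNat : Nat) : Int) := by omega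
    have hw := wsum_eq_F K (C * i) C.toNat 0
    simp only [zero_add, add_zero] at hw
    have hR : PySem.List.pyRange 0 C 1 = PySem.List.pyRange 0 ((C.toNat : Nat) : Int) 1 := by
      rw [← hC]
    rw [hR, hw]; ring

-- "".join of a cons (on List Char)
theorem join_nil_cons (c : List Char) (cs : List (List Char)) :
    PySem.Chars.join [] (c :: cs) = c ++ PySem.Chars.join [] cs := by
  cases cs with
  | nil => simp [PySem.Chars.join_singleton, PySem.Chars.join_nil]
  | cons d rest => rw [PySem.Chars.join_cons_cons]; simp

theorem join_nil_append_singleton (cs : List (List Char)) (c : List Char) :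
    PySem.Chars.join [] (cs ++ [c]) = PySem.Chars.join [] cs ++ c := by
  induction cs with
  | nil => simp [PySem.Chars.join_singleton, PySem.Chars.join_nil]
  | cons d rest ih => rw [List.cons_append, join_nil_cons, join_nil_cons, ih, List.append_assoc]

-- string accumulation 'r += g(i)' equals join of the mapped list
theorem foldl_append_toList (g : Int → String) (L : List Int) : ∀ (acc : String),
    (L.foldl (fun r i => r ++ g i) acc).toList
    = acc.toList ++ PySem.Chars.join [] (L.map (fun i => (g i).toList)) := by
  induction L with
  | nil => intro acc; simp [PySem.Chars.join_nil]
  | cons x xs ih =>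
    intro acc
    simp only [List.foldl_cons, List.map_cons, ih, join_nil_cons]
    simp

theorem foldl_append_join (g : Int → String) (L : List Int) :
    L.foldl (fun r i => r ++ g i) "" = PySem.Str.join "" (L.map g) := by
  apply String.toList_inj.mp
  rw [foldl_append_toList]
  simp [List.map_map, Function.comp_def]

theorem join_append_singleton (cs : List String) (c : String) :
    PySem.Str.join "" (cs ++ [c]) = PySem.Str.join "" cs ++ c := by
  apply String.toList_inj.mp
  simp [join_nil_append_singleton]

-- full-chunk token: for 0 ≤ i < N-1 the whole chunk lies below K
theorem token_full (K C N r : Int) (e1 : K = C * N - r) (hr : 0 < C → 0 ≤ r ∧ r < C)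
    (i : Int) (h1 : i < N - 1) :
    F K C.toNat (C * i) = C * i * psumK K C.toNat + tsumK K C.toNat := by
  rw [F_closed]
  have hmin : min C.toNat (K - C * i).toNat = C.toNat := by
    rcases lt_or_ge 0 C with hC | hC
    · obtain ⟨hr0, hr1⟩ := hr hC
      have h2 : C * i ≤ C * (N - 2) := mul_le_mul_of_nonneg_left (by omega) (by omega)
      have h3 : C * (N - 2) = C * N - 2 * C := by ring
      have h4 : C ≤ K - C * i := by linarith
      generalize K - C * i = b at h4 ⊢
      omega
    · have hc0 : C.toNat = 0 := by omega
      simp [hc0]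
  rw [hmin]

-- last token: the chunk is cut at K (C > 0) or empty (C < 0)
theorem token_last (K C N r : Int) (hC0 : C ≠ 0) (e1 : K = C * N - r)
    (hrp : 0 < C → 0 ≤ r) (hrn : C < 0 → C < r ∧ r ≤ 0) :
    F K C.toNat (C * (N - 1))
      = C * (N - 1) * psumK K (K - C * (N - 1)).toNat + tsumK K (K - C * (N - 1)).toNat := by
  rw [F_closed]
  have e2 : K - C * (N - 1) = C - r := by rw [e1]; ring
  have hmin : min C.toNat (K - C * (N - 1)).toNat = (K - C * (N - 1)).toNat := by
    rcases lt_or_ge 0 C with hC | hC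
    · have := hrp hC
      generalize hb : K - C * (N - 1) = b at e2 ⊢
      omega
    · have hC' : C < 0 := lt_of_le_of_ne hC hC0
      have := hrn hC'
      generalize hb : K - C * (N - 1) = b at e2 ⊢
      omega
  rw [hmin]

-- ===== VERDICT (by name: the statement is the Claim_ definition above) =====
theorem solve_spec : Claim_equal_solve := by
  intro K C S _hD hP
  unfold Spec_solve solve solve_alt
  by_cases hN : -(PySem.Int.floordiv (-K) C) > S
  · simp [hN]
  · simp only [hN, if_false]
    set N := -(PySem.Int.floordiv (-K) C) with hNdef
    set r := PySem.Int.mod (-K) C with hrdef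
    have e1 : K = C * N - r := by
      have hid := PySem.Int.floordiv_mul_add_mod (-K) C
      have hcm : PySem.Int.floordiv (-K) C * C = C * PySem.Int.floordiv (-K) C := mul_comm _ _
      rw [hNdef]
      linarith [hid, hcm]
    rcases le_or_gt N 0 with hN0 | hNpos
    · rw [PySem.List.pyRange_one_eq_nil hN0, PySem.List.pyRange_one_eq_nil (by omega : N - 1 ≤ (0:Int))]
      simp only [List.foldl_nil, if_neg (by omega : ¬ N > 0), if_neg (by omega : ¬ N > 1)]
      apply String.toList_inj.mp
      simp [PySem.Chars.join_nil]
    · rw [foldl_append_join, if_pos hNpos]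
      have hsplit : PySem.List.pyRange 0 N 1
          = PySem.List.pyRange 0 (N - 1) 1 ++ PySem.List.pyRange (N - 1) N 1 :=
        PySem.List.pyRange_one_append 0 (N - 1) N (by omega) (by omega)
      have hsing : PySem.List.pyRange (N - 1) N 1 = [N - 1] := by
        have h := PySem.List.pyRange_one_singleton (N - 1)
        rw [show N - 1 + 1 = N by ring] at h
        exact h
      rw [hsplit, hsing, List.map_append, List.map_singleton, join_append_singleton,
          join_append_singleton]
      have hrpos : 0 < C → 0 ≤ r ∧ r < C := fun h =>
        ⟨PySem.Int.mod_nonneg (-K) h, PySem.Int.mod_lt (-K) h⟩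
      have hrneg : C < 0 → C < r ∧ r ≤ 0 := fun h => PySem.Int.mod_neg_bounds (-K) h
      rcases le_or_gt N 1 with hN1 | hN1
      · rw [if_neg (by omega : ¬ N > 1),
            PySem.List.pyRange_one_eq_nil (by omega : N - 1 ≤ (0:Int)), List.map_nil]
        congr 1
        rw [tokenA_eq_F, consts_eq,
            token_last K C N r hP e1 (fun h => (hrpos h).1) hrneg]
      · rw [if_pos hN1]
        congr 1
        · refine congrArg _ (List.map_congr_left ?_)
          intro i hi
          rw [PySem.List.mem_pyRange_one] at hi
          rw [tokenA_eq_F, consts_eq,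
              token_full K C N r e1 hrpos i hi.2]
        · rw [tokenA_eq_F, consts_eq,
              token_last K C N r hP e1 (fun h => (hrpos h).1) hrneg]
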